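-- pv_equiv track=rewrite | github.com/cas-packone/packone | pk1/clouds/utils.py | remedy_script_tidy
-- ===== SOURCE A (Python) =====
-- def remedy_script_tidy(script, supervisor_operations):
--     stats=[s.rstrip() for s in script.split('\n')]
--     begin_i=0
--     current_i=0
--     length=len(stats)
--     operations=[]
--     while current_i < length:
--         if not stats[current_i] or stats[current_i] in supervisor_operations:
--             if current_i>begin_i:
--                 operations.append('\n'.join(stats[begin_i:current_i]))
--             if stats[current_i]:
--                 operations.append(stats[current_i])
--             begin_i=current_i+1
--         elif current_i==length-1:
--             operations.append('\n'.join(stats[begin_i:current_i+1]))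
--         current_i+=1
--     return operations
-- ===== SOURCE B (Python) =====
-- def remedy_script_tidy(script, supervisor_operations):
--     operations = []
--     buf = []
--     for line in (s.rstrip() for s in script.split('\n')):
--         if not line or line in supervisor_operations:
--             if buf:
--                 operations.append('\n'.join(buf))
--                 buf = []
--             if line:
--                 operations.append(line)
--         else:
--             buf.append(line)
--     if buf:
--         operations.append('\n'.join(buf))
--     return operations
-- ===== Notes on version B (the rewrite author's own statement) =====
-- stated objective: simpler
-- what changed: Replaced A's begin_i/current_i index bookkeeping with slicing and a special last-element elif by a single pass over the rstripped lines that maintains a buffer list, flushing it at blank/supervisor lines and once after the loop.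
import Mathlib
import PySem

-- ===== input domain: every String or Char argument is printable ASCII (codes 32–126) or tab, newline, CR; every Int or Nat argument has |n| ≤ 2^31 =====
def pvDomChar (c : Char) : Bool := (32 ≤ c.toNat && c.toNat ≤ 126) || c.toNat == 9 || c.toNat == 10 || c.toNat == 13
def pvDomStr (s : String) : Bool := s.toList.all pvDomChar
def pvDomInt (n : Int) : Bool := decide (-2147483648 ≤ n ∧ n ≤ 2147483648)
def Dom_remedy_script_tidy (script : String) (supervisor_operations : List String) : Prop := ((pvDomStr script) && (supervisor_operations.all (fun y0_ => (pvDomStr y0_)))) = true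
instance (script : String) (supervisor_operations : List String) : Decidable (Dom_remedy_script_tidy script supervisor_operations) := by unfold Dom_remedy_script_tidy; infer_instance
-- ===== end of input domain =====

-- B replaces A's begin_i/current_i index bookkeeping and slicing by a single pass
-- maintaining a line buffer that is flushed at blanks/supervisor ops (objective: simpler).

-- ===== PORT A =====
-- A's while-loop: state (begin_i, current_i, operations); the `current_i < length`
-- guard of the while loop also keeps the index access total.
def pvALoop (stats sup : List String) (length begin_i current_i : Nat)
    (operations : List String) : List String :=
  if _h : current_i < length then
    let s := stats.getD current_i ""
    if s = "" ∨ s ∈ sup then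
      let ops1 := if begin_i < current_i then
          operations ++ [PySem.Str.join "\n" (PySem.List.slice stats (some (begin_i : Int)) (some (current_i : Int)))]
        else operations
      let ops2 := if s ≠ "" then ops1 ++ [s] else ops1
      pvALoop stats sup length (current_i + 1) (current_i + 1) ops2
    else if current_i = length - 1 then
      pvALoop stats sup length begin_i (current_i + 1)
        (operations ++ [PySem.Str.join "\n" (PySem.List.slice stats (some (begin_i : Int)) (some ((current_i : Int) + 1)))])
    else
      pvALoop stats sup length begin_i (current_i + 1) operations
  else operations
termination_by length - current_i

def remedy_script_tidy (script : String) (supervisor_operations : List String) : List String :=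
  let stats := ((PySem.Str.split? script "\n").getD []).map PySem.Str.rstrip
  pvALoop stats supervisor_operations stats.length 0 0 []

-- ===== PORT B =====
-- B's for-loop over the rstripped lines, carrying (operations, buf).
def pvBLoop (sup : List String) (lines operations buf : List String) : List String :=
  match lines with
  | [] => if buf ≠ [] then operations ++ [PySem.Str.join "\n" buf] else operations
  | line :: rest =>
    if line = "" ∨ line ∈ sup then
      let ops1 := if buf ≠ [] then operations ++ [PySem.Str.join "\n" buf] else operations
      let ops2 := if line ≠ "" then ops1 ++ [line] else ops1
      pvBLoop sup rest ops2 []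
    else
      pvBLoop sup rest operations (buf ++ [line])

def remedy_script_tidy_alt (script : String) (supervisor_operations : List String) : List String :=
  pvBLoop supervisor_operations (((PySem.Str.split? script "\n").getD []).map PySem.Str.rstrip) [] []

-- ===== PRECONDITION & SPEC =====
def Spec_remedy_script_tidy (script : String) (supervisor_operations : List String) (out : List String) : Prop := out = remedy_script_tidy_alt script supervisor_operations
instance (script : String) (supervisor_operations : List String) (out : List String) : Decidable (Spec_remedy_script_tidy script supervisor_operations out) := by unfold Spec_remedy_script_tidy; infer_instance

-- ===== CLAIM (what is proved, stated in full; the proofs are below) =====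
def Claim_equal_remedy_script_tidy : Prop := ∀ (script : String) (supervisor_operations : List String), Dom_remedy_script_tidy script supervisor_operations → Spec_remedy_script_tidy script supervisor_operations (remedy_script_tidy script supervisor_operations)

-- ===== LEMMAS AND PROOFS =====

theorem pvALoop_stop (stats sup : List String) (length begin_i current : Nat)
    (ops : List String) (h : ¬ current < length) :
    pvALoop stats sup length begin_i current ops = ops := by
  rw [pvALoop]; simp [h]

theorem pvBLoop_nil (sup ops buf : List String) :
    pvBLoop sup [] ops buf = if buf ≠ [] then ops ++ [PySem.Str.join "\n" buf] else ops := rfl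

-- Invariant relating the two loops: B's buffer is exactly A's pending slice
-- stats[begin_i:current_i].
theorem loop_eq (stats sup : List String) :
    ∀ (n current begin_i : Nat) (ops : List String),
      n = stats.length - current → begin_i ≤ current → current ≤ stats.length →
      (current = stats.length → begin_i = current) →
      pvALoop stats sup stats.length begin_i current ops
        = pvBLoop sup (stats.drop current) ops ((stats.drop begin_i).take (current - begin_i)) := by
  intro n
  induction n with
  | zero =>
    intro current begin_i ops hn hbc hcl hend
    have hc : current = stats.length := by omega
    have hb : begin_i = current := hend hc
    rw [pvALoop]
    simp [hc, hb, List.drop_length, pvBLoop]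
  | succ n ih =>
    intro current begin_i ops hn hbc hcl hend
    have hc : current < stats.length := by omega
    have hdrop : stats.drop current = stats[current] :: stats.drop (current + 1) :=
      List.drop_eq_getElem_cons hc
    have hgetD : stats.getD current "" = stats[current] := List.getD_eq_getElem stats "" hc
    have hbufne : ((stats.drop begin_i).take (current - begin_i) ≠ []) ↔ begin_i < current := by
      constructor
      · intro h
        by_contra hlt
        have : begin_i = current := by omega
        simp [this] at h
      · intro h
        have hlen : ((stats.drop begin_i).take (current - begin_i)).length = current - begin_i := by
          simp [List.length_take, List.length_drop]; omega
        intro hnil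
        rw [hnil] at hlen
        simp at hlen
        omega
    have hslice : PySem.List.slice stats (some (begin_i : Int)) (some (current : Int))
        = (stats.drop begin_i).take (current - begin_i) := PySem.List.slice_natCast stats begin_i current
    have htakeS : (stats.drop begin_i).take (current + 1 - begin_i)
        = (stats.drop begin_i).take (current - begin_i) ++ [stats[current]] := by
      have h1 : current - begin_i < (stats.drop begin_i).length := by
        simp [List.length_drop]; omega
      have h2 : current + 1 - begin_i = (current - begin_i) + 1 := by omega
      rw [h2, List.take_add_one]
      congr 1
      have : (stats.drop begin_i)[current - begin_i]? = some ((stats.drop begin_i)[current - begin_i]) :=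
        List.getElem?_eq_getElem h1
      rw [this]
      simp [List.getElem_drop]
      congr 1
      omega
    rw [pvALoop]
    rw [hdrop, pvBLoop]
    simp only [hc, dif_pos, hgetD]
    by_cases hsp : stats[current] = "" ∨ stats[current] ∈ sup
    · simp only [hsp, if_pos]
      have hops : (if begin_i < current then
            ops ++ [PySem.Str.join "\n" (PySem.List.slice stats (some (begin_i : Int)) (some (current : Int)))]
          else ops)
          = (if (stats.drop begin_i).take (current - begin_i) ≠ [] then
            ops ++ [PySem.Str.join "\n" ((stats.drop begin_i).take (current - begin_i))] else ops) := by
        rw [hslice]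
        by_cases h : begin_i < current
        · rw [if_pos h, if_pos (hbufne.mpr h)]
        · rw [if_neg h, if_neg (fun hb => h (hbufne.mp hb))]
      rw [← hops]
      rw [ih (current + 1) (current + 1) _ (by omega) (le_refl _) (by omega) (fun _ => rfl)]
      simp
    · simp only [hsp, if_false]
      by_cases hlast : current = stats.length - 1
      · rw [if_pos hlast]
        have hc1 : current + 1 = stats.length := by omega
        rw [pvALoop_stop stats sup _ _ _ _ (by omega)]
        have hrest : stats.drop (current + 1) = [] := by rw [hc1, List.drop_length]
        rw [hrest, pvBLoop_nil]
        have hne : (stats.drop begin_i).take (current - begin_i) ++ [stats[current]] ≠ [] := by simp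
        rw [if_pos hne]
        have : PySem.List.slice stats (some (begin_i : Int)) (some ((current : Int) + 1))
            = (stats.drop begin_i).take (current - begin_i) ++ [stats[current]] := by
          have := PySem.List.slice_natCast stats begin_i (current + 1)
          push_cast at this
          rw [this, htakeS]
        rw [this]
      · rw [if_neg hlast]
        rw [ih (current + 1) begin_i _ (by omega) (by omega) (by omega) (fun h => absurd h (by omega))]
        rw [htakeS]

-- ===== VERDICT (by name: the statement is the Claim_ definition above) =====
theorem remedy_script_tidy_spec : Claim_equal_remedy_script_tidy := by
  intro script sup _
  unfold Spec_remedy_script_tidy remedy_script_tidy remedy_script_tidy_alt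
  exact loop_eq _ sup _ 0 0 [] rfl (le_refl _) (Nat.zero_le _)
    (fun h => by simp)
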